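-- pv_equiv track=rewrite | github.com/SirPoko/Lexer-Poko | lexerPoko.py | mif
-- ===== SOURCE A (Python) =====
-- ESTADO_FINAL = "ESTADO FINAL"
--
-- ESTADO_NO_FINAL = "NO ACEPTADO"
--
-- ESTADO_TRAMPA = "EN ESTADO TRAMPA"
--
-- def mif(cadena):
--     estado = 0
--     estados_aceptados = [2]
--     delta = {0:{'i':1}, 1:{'f':2}, 2:{}}
--     for caracter in cadena:
--         if caracter in delta[estado].keys():
--             estado = delta[estado][caracter]
--         else:
--             estado = -1
--             break
--     if estado == -1:
--         return ESTADO_TRAMPA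
--     if estado in estados_aceptados:
--         return ESTADO_FINAL
--     else:
--         return ESTADO_NO_FINAL
-- ===== SOURCE B (Python) =====
-- ESTADO_FINAL = "ESTADO FINAL"
--
-- ESTADO_NO_FINAL = "NO ACEPTADO"
--
-- ESTADO_TRAMPA = "EN ESTADO TRAMPA"
--
-- def mif(cadena):
--     # The DFA accepts exactly "if"; its live non-final configurations are the
--     # proper prefixes "" and "i"; everything else falls into the trap.
--     if cadena == "if":
--         return ESTADO_FINAL
--     if cadena in ("", "i"):
--         return ESTADO_NO_FINAL
--     return ESTADO_TRAMPA
-- ===== Notes on version B (the rewrite author's own statement) =====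
-- stated objective: simpler
-- what changed: Replaced the transition-table character scan with closed-form equality checks against the accepted string 'if' and its proper prefixes '' and 'i'.
import Mathlib
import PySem

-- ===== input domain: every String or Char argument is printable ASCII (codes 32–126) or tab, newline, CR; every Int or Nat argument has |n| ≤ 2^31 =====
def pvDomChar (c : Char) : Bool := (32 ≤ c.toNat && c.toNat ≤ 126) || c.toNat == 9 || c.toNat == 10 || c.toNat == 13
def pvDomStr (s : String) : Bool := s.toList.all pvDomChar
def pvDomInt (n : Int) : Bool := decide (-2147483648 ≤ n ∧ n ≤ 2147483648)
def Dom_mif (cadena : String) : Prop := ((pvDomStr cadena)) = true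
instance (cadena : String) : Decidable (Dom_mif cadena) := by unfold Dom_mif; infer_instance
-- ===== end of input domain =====

-- B replaces A's transition-table scan with closed-form equality checks ("if", "", "i").
-- ===== PORT A =====
def mifDelta : PySem.Dict Int (PySem.Dict Char Int) :=
  PySem.Dict.mk
    [(0, PySem.Dict.mk [('i', 1)]),
     (1, PySem.Dict.mk [('f', 2)]),
     (2, PySem.Dict.mk [])]

-- the for-loop with its break: a missing transition sets estado := -1 and stops.
-- (the outer lookup delta[estado] never misses while the loop runs — estado stays in {0,1,2};
--  the unreachable 'none' arm also yields -1)
def mifLoop (estado : Int) : List Char → Int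
  | [] => estado
  | c :: rest =>
    match PySem.Dict.get? mifDelta estado with
    | some d =>
      match PySem.Dict.get? d c with
      | some e => mifLoop e rest
      | none => -1
    | none => -1

def mif (cadena : String) : String :=
  let estado := mifLoop 0 cadena.toList
  if estado = -1 then "EN ESTADO TRAMPA"
  else if estado ∈ [(2 : Int)] then "ESTADO FINAL"
  else "NO ACEPTADO"

-- ===== PORT B =====
def mif_alt (cadena : String) : String :=
  if cadena = "if" then "ESTADO FINAL"
  else if cadena = "" ∨ cadena = "i" then "NO ACEPTADO"
  else "EN ESTADO TRAMPA"

-- ===== PRECONDITION & SPEC =====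
def Spec_mif (cadena : String) (out : String) : Prop := out = mif_alt cadena
instance (cadena : String) (out : String) : Decidable (Spec_mif cadena out) := by unfold Spec_mif; infer_instance

-- ===== CLAIM (what is proved, stated in full; the proofs are below) =====
def Claim_equal_mif : Prop := ∀ (cadena : String), Dom_mif cadena → Spec_mif cadena (mif cadena)

-- ===== LEMMAS AND PROOFS =====

-- string equality against a literal, moved to the List Char side
theorem mif_str_eq_iff (s t : String) (m : List Char) (ht : t.toList = m) :
    (s = t) ↔ s.toList = m := by
  constructor
  · rintro rfl; exact ht
  · intro h; apply String.toList_injective; rw [h, ht]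

-- the ports agree, stated over the character list
theorem mif_list_eq (l : List Char) :
    (if mifLoop 0 l = -1 then "EN ESTADO TRAMPA"
     else if mifLoop 0 l ∈ [(2 : Int)] then "ESTADO FINAL" else "NO ACEPTADO") =
    (if l = ['i', 'f'] then "ESTADO FINAL"
     else if l = [] ∨ l = ['i'] then "NO ACEPTADO" else "EN ESTADO TRAMPA") := by
  match l with
  | [] => decide
  | [c] =>
    by_cases h : c = 'i'
    · subst h; decide
    · simp [mifLoop, mifDelta, PySem.Dict.get?, h, Ne.symm h]
  | c :: d :: rest =>
    by_cases h1 : c = 'i' <;> by_cases h2 : d = 'f'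
    · subst h1; subst h2
      match rest with
      | [] => decide
      | e :: rest' =>
        simp [mifLoop, mifDelta, PySem.Dict.get?]
    · subst h1
      simp [mifLoop, mifDelta, PySem.Dict.get?, h2, Ne.symm h2]
    · simp [mifLoop, mifDelta, PySem.Dict.get?, h1, Ne.symm h1]
    · simp [mifLoop, mifDelta, PySem.Dict.get?, h1, Ne.symm h1]

-- ===== VERDICT (by name: the statement is the Claim_ definition above) =====
theorem mif_spec : Claim_equal_mif := by
  intro cadena _
  unfold Spec_mif
  simp only [mif, mif_alt,
    mif_str_eq_iff cadena "if" ['i', 'f'] rfl,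
    mif_str_eq_iff cadena "" [] rfl,
    mif_str_eq_iff cadena "i" ['i'] rfl]
  exact mif_list_eq cadena.toList
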